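-- pv_equiv track=rewrite | github.com/Abdomash/allam-challenge | Prompter.py | format_abyat
-- ===== SOURCE A (Python) =====
-- def format_abyat(shatrs): #shatrs -> Shatr0 *** Shatr 1
--     ret = ""
--     first_half = True
--     for s in shatrs:
--         if first_half:
--             first_half = False
--             ret += s
--             ret += " *** "
--         else:
--             first_half = True
--             ret += s
--             ret += "\n"
--     return ret
-- ===== SOURCE B (Python) =====
-- def format_abyat(shatrs):
--     _SENTINEL = object()
--     parts = []
--     it = iter(shatrs)
--     for first in it:
--         parts.append(first + " *** ")
--         second = next(it, _SENTINEL)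
--         if second is not _SENTINEL:
--             parts.append(second + "\n")
--     return "".join(parts)
-- ===== Notes on version B (the rewrite author's own statement) =====
-- stated objective: alternative
-- what changed: B consumes the input two elements per iteration via an explicit iterator with a sentinel, collecting formatted pieces in a list joined once, instead of A's boolean-toggle single-string accumulation.
import Mathlib
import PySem

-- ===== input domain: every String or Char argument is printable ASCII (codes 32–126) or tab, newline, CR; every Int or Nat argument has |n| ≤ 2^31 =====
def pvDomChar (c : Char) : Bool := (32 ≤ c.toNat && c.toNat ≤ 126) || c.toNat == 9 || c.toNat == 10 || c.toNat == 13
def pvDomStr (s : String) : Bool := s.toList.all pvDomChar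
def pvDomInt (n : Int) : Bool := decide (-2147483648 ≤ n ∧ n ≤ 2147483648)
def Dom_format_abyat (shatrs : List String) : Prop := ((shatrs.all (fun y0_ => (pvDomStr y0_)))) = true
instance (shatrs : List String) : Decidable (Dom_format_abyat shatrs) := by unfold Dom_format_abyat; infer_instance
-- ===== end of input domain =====

-- B reformats pairs by consuming two elements per step (iterator + sentinel, list of parts joined once) instead of A's boolean-toggle string accumulation; same output, no speed claim.


-- ===== PORT A =====
def format_abyat (shatrs : List String) : String :=
  (shatrs.foldl
    (fun (st : String × Bool) s =>
      if st.2 then (st.1 ++ s ++ " *** ", false)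
      else (st.1 ++ s ++ "\n", true))
    ("", true)).1

-- ===== PORT B =====
-- pair-consuming pass: take two elements per step, collect pieces, join once
def pvAltParts : List String → List String
  | [] => []
  | [a] => [a ++ " *** "]
  | a :: b :: rest => (a ++ " *** ") :: (b ++ "\n") :: pvAltParts rest

def format_abyat_alt (shatrs : List String) : String :=
  String.join (pvAltParts shatrs)

-- ===== PRECONDITION & SPEC =====
def Spec_format_abyat (shatrs : List String) (out : String) : Prop := out = format_abyat_alt shatrs
instance (shatrs : List String) (out : String) : Decidable (Spec_format_abyat shatrs out) := by unfold Spec_format_abyat; infer_instance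

-- ===== CLAIM (what is proved, stated in full; the proofs are below) =====
def Claim_equal_format_abyat : Prop := ∀ (shatrs : List String), Dom_format_abyat shatrs → Spec_format_abyat shatrs (format_abyat shatrs)

-- ===== LEMMAS AND PROOFS =====

-- ===== VERDICT (by name: the statement is the Claim_ definition above) =====
theorem pvFoldlApp : ∀ (l : List String) (s t : String),
    l.foldl (· ++ ·) (s ++ t) = s ++ l.foldl (· ++ ·) t
  | [], _, _ => rfl
  | x :: l, s, t => by
      simp only [List.foldl_cons, String.append_assoc]
      exact pvFoldlApp l s (t ++ x)

theorem pvJoin_cons (a : String) (l : List String) :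
    String.join (a :: l) = a ++ String.join l := by
  simp only [String.join, List.foldl_cons]
  simpa using pvFoldlApp l a ""

theorem pvFoldl_eq : ∀ (l : List String) (acc : String),
    (l.foldl
      (fun (st : String × Bool) s =>
        if st.2 then (st.1 ++ s ++ " *** ", false)
        else (st.1 ++ s ++ "\n", true))
      (acc, true)).1 = acc ++ String.join (pvAltParts l)
  | [], acc => by simp [pvAltParts, String.join]
  | [a], acc => by
      simp [pvAltParts, String.join, List.foldl, String.append_assoc]
  | a :: b :: rest, acc => by
      simp only [List.foldl_cons, if_true, Bool.false_eq_true, if_false]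
      rw [pvFoldl_eq rest (acc ++ a ++ " *** " ++ b ++ "\n"),
        pvAltParts, pvJoin_cons, pvJoin_cons]
      simp [String.append_assoc]

theorem format_abyat_spec : Claim_equal_format_abyat := by
  intro shatrs _
  unfold Spec_format_abyat format_abyat format_abyat_alt
  simpa using pvFoldl_eq shatrs ""
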